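-- pv_equiv track=rewrite | github.com/qwefep/classification2diagrams | main.py | generation_stars
-- ===== SOURCE A (Python) =====
-- def generation_stars(k):
--     ##возвращает cписок списков (p, m, d), где m- кол-во меридиан, p- кол-во параллелей, d- кол-во диагоналей
--     ##генерация всех неизоморфных троек (m, p, d)
--     all_stars = []
--     for p in range(1, k):
--         for m in range(1, k - p + 1):
--             if m <= p and (k - m - p) <= m:
--                 star = [p, m, k - m - p]
--                 if star not in all_stars:
--                     all_stars.append(star)
--     return all_stars
-- ===== SOURCE B (Python) =====
-- def generation_stars(k):
--     # Recursive partition enumerator: 3 nonincreasing parts summing to k,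
--     # first two parts >= 1, last >= 0; no quadratic-list membership test.
--     def parts(remaining, left, max_part):
--         if left == 1:
--             return [[remaining]] if 0 <= remaining <= max_part else []
--         res = []
--         v = 1
--         hi = min(max_part, remaining)
--         while v <= hi:
--             for tail in parts(remaining - v, left - 1, v):
--                 res.append([v] + tail)
--             v += 1
--         return res
--     return parts(k, 3, k - 1)
-- ===== Notes on version B (the rewrite author's own statement) =====
-- stated objective: faster
-- what changed: Replaces the nested p,m scan with its filter and O(n) 'star not in all_stars' list-membership test by a recursive bounded-partition enumerator (remaining, parts_left, max_part) whose tightened ranges make every emitted triple unique by construction, so the dedup scan disappears.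
import Mathlib
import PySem

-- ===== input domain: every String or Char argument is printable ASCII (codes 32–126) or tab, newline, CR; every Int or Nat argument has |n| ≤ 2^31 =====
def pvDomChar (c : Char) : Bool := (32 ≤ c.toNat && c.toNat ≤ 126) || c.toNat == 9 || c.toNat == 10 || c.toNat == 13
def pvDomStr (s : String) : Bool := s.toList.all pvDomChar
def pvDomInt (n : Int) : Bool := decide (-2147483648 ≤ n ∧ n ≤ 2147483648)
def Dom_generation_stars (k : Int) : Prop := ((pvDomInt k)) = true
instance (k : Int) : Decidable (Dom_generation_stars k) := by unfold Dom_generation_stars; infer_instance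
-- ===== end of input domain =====

-- B replaces A's nested scan with its linear `star not in all_stars` dedup test by a
-- recursive bounded-partition enumerator with tight ranges (no dedup needed); measurably faster.

-- ===== PORT A =====
def generation_stars (k : Int) : List (List Int) :=
  (PySem.List.pyRange 1 k 1).foldl (fun all_stars p =>
    (PySem.List.pyRange 1 (k - p + 1) 1).foldl (fun all_stars m =>
      if m ≤ p ∧ (k - m - p) ≤ m then
        if [p, m, k - m - p] ∈ all_stars then all_stars
        else all_stars ++ [[p, m, k - m - p]]
      else all_stars) all_stars) []

-- ===== PORT B =====
-- helper `parts` of Source B; `left` is the number of parts still to place (structural recursion)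
def pvParts (remaining : Int) (left : Nat) (max_part : Int) : List (List Int) :=
  match left with
  | 0 => []   -- never reached from generation_stars_alt (left starts at 3)
  | 1 => if 0 ≤ remaining ∧ remaining ≤ max_part then [[remaining]] else []
  | l + 2 =>
      (PySem.List.pyRange 1 (min max_part remaining + 1) 1).foldl
        (fun res v => res ++ (pvParts (remaining - v) (l + 1) v).map (fun tail => v :: tail)) []

def generation_stars_alt (k : Int) : List (List Int) := pvParts k 3 (k - 1)

-- ===== PRECONDITION & SPEC =====
def Spec_generation_stars (k : Int) (out : List (List Int)) : Prop := out = generation_stars_alt k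
instance (k : Int) (out : List (List Int)) : Decidable (Spec_generation_stars k out) := by unfold Spec_generation_stars; infer_instance

-- ===== CLAIM (what is proved, stated in full; the proofs are below) =====
def Claim_equal_generation_stars : Prop := ∀ (k : Int), Dom_generation_stars k → Spec_generation_stars k (generation_stars k)

-- ===== LEMMAS AND PROOFS =====

-- the (p,m) pairs A's nested loops run over
def pvPairs (k : Int) : List (Int × Int) :=
  (PySem.List.pyRange 1 k 1).flatMap (fun p =>
    (PySem.List.pyRange 1 (k - p + 1) 1).map (fun m => (p, m)))

-- a fold that appends `f x` when `q x` holds and `f x` is not yet present equals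
-- plain filter+map when the emitted values are distinct and absent from `acc`
theorem pv_foldl_dedup {α β : Type} [DecidableEq β] (q : α → Prop) [DecidablePred q]
    (f : α → β) (l : List α) (acc : List β)
    (hnd : ((l.filter (fun x => decide (q x))).map f).Nodup)
    (hdj : ∀ x ∈ l, q x → f x ∉ acc) :
    l.foldl (fun a x => if q x then (if f x ∈ a then a else a ++ [f x]) else a) acc
      = acc ++ (l.filter (fun x => decide (q x))).map f := by
  induction l generalizing acc with
  | nil => simp
  | cons x t ih =>
    by_cases hx : q x
    · have hfx : f x ∉ acc := hdj x (by simp) hx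
      have hfil : (x :: t).filter (fun y => decide (q y)) = x :: t.filter (fun y => decide (q y)) :=
        List.filter_cons_of_pos (by simpa using hx)
      rw [hfil, List.map_cons] at hnd ⊢
      rw [List.foldl_cons, if_pos hx, if_neg hfx,
        ih (acc ++ [f x]) (List.nodup_cons.1 hnd).2 ?_, List.append_assoc, List.singleton_append]
      intro y hy hqy
      simp only [List.mem_append, List.mem_singleton, not_or]
      refine ⟨hdj y (by simp [hy]) hqy, fun he => ?_⟩
      exact (List.nodup_cons.1 hnd).1
        (he ▸ List.mem_map_of_mem (List.mem_filter.2 ⟨hy, decide_eq_true hqy⟩))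
    · have hfil : (x :: t).filter (fun y => decide (q y)) = t.filter (fun y => decide (q y)) :=
        List.filter_cons_of_neg (by simpa using hx)
      rw [hfil] at hnd ⊢
      rw [List.foldl_cons, if_neg hx]
      exact ih acc hnd fun y hy => hdj y (by simp [hy])

theorem pv_nodup_flat (g : Int → List Int) (hg : ∀ p, (g p).Nodup) :
    ∀ l : List Int, l.Nodup → (l.flatMap (fun p => (g p).map (fun m => (p, m)))).Nodup := by
  intro l
  induction l with
  | nil => intro _; simp
  | cons p t ih =>
    intro hl
    rw [List.flatMap_cons]
    refine List.Nodup.append ((hg p).map fun a b hab => ?_) (ih hl.of_cons) ?_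
    · simpa using hab
    · intro x hx hx'
      have h1 : x.1 = p := by
        rcases List.mem_map.1 hx with ⟨m, _, rfl⟩; rfl
      rcases List.mem_flatMap.1 hx' with ⟨p', hp', hxp'⟩
      have h2 : x.1 = p' := by
        rcases List.mem_map.1 hxp' with ⟨m, _, rfl⟩; rfl
      exact (List.nodup_cons.1 hl).1 (h1 ▸ h2 ▸ hp')

theorem pv_nodup_pairs (k : Int) : (pvPairs k).Nodup :=
  pv_nodup_flat _ (fun _ => PySem.List.nodup_pyRange_one _ _) _ (PySem.List.nodup_pyRange_one _ _)

theorem pv_star_inj (k : Int) :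
    Function.Injective (fun pm : Int × Int => [pm.1, pm.2, k - pm.2 - pm.1]) := by
  intro ⟨a, b⟩ ⟨c, d⟩ h
  simp only [List.cons.injEq] at h
  simp [h.1, h.2.1]

-- A equals filter+map over the pair list
theorem pv_A_eq (k : Int) :
    generation_stars k
      = ((pvPairs k).filter
            (fun pm => decide (pm.2 ≤ pm.1 ∧ k - pm.2 - pm.1 ≤ pm.2))).map
          (fun pm => [pm.1, pm.2, k - pm.2 - pm.1]) := by
  have h1 : generation_stars k
      = (pvPairs k).foldl
          (fun a pm => if pm.2 ≤ pm.1 ∧ k - pm.2 - pm.1 ≤ pm.2 then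
              (if [pm.1, pm.2, k - pm.2 - pm.1] ∈ a then a
               else a ++ [[pm.1, pm.2, k - pm.2 - pm.1]]) else a) [] := by
    unfold generation_stars pvPairs
    rw [List.foldl_flatMap]
    exact PySem.List.foldl_congr_mem _ _ _ _ fun acc p _ => by rw [List.foldl_map]
  have hnd : (((pvPairs k).filter
        (fun pm => decide (pm.2 ≤ pm.1 ∧ k - pm.2 - pm.1 ≤ pm.2))).map
        (fun pm => [pm.1, pm.2, k - pm.2 - pm.1])).Nodup :=
    ((pv_nodup_pairs k).filter _).map (pv_star_inj k)
  have h3 := pv_foldl_dedup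
    (fun pm : Int × Int => pm.2 ≤ pm.1 ∧ k - pm.2 - pm.1 ≤ pm.2)
    (fun pm => [pm.1, pm.2, k - pm.2 - pm.1]) (pvPairs k) [] hnd (by simp)
  refine h1.trans (Eq.trans ?_ (h3.trans (List.nil_append _)))
  exact PySem.List.foldl_congr_mem _ _ _ _ fun acc x _ => by split_ifs <;> rfl

-- flatMap of an if-singleton is filter+map
theorem pv_flatMap_ite {α β : Type} (l : List α) (q : α → Prop) [DecidablePred q] (u : α → β) :
    l.flatMap (fun x => if q x then [u x] else [])
      = (l.filter (fun x => decide (q x))).map u := by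
  induction l with
  | nil => rfl
  | cons x t ih =>
    by_cases hx : q x <;> simp [List.flatMap_cons, hx, ih]

-- B unfolded to flatMap form
theorem pv_B_eq (k : Int) :
    generation_stars_alt k
      = (PySem.List.pyRange 1 (min (k - 1) k + 1) 1).flatMap (fun p =>
          ((PySem.List.pyRange 1 (min p (k - p) + 1) 1).filter
              (fun m => decide (0 ≤ k - p - m ∧ k - p - m ≤ m))).map
            (fun m => [p, m, k - p - m])) := by
  unfold generation_stars_alt
  show (PySem.List.pyRange 1 (min (k - 1) k + 1) 1).foldl
      (fun res v => res ++ (pvParts (k - v) 2 v).map (fun tail => v :: tail)) [] = _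
  rw [PySem.List.foldl_append_eq_flatMap, List.nil_append]
  refine List.flatMap_congr ?_
  intro p _
  show ((PySem.List.pyRange 1 (min p (k - p) + 1) 1).foldl
      (fun res v => res ++ (pvParts (k - p - v) 1 v).map (fun tail => v :: tail)) []).map
        (fun tail => p :: tail) = _
  rw [PySem.List.foldl_append_eq_flatMap, List.nil_append, List.map_flatMap]
  rw [List.flatMap_congr (g := fun m =>
      if 0 ≤ k - p - m ∧ k - p - m ≤ m then [[p, m, k - p - m]] else []) ?_]
  · exact pv_flatMap_ite _ (fun m => 0 ≤ k - p - m ∧ k - p - m ≤ m) (fun m => [p, m, k - p - m])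
  · intro m _
    show ((if 0 ≤ k - p - m ∧ k - p - m ≤ m then [[k - p - m]] else []).map
        (fun tail => m :: tail)).map (fun tail => p :: tail) = _
    by_cases hc : 0 ≤ k - p - m ∧ k - p - m ≤ m
    · rw [if_pos hc]; exact (if_pos hc).symm
    · rw [if_neg hc]; exact (if_neg hc).symm

-- per-p inner lists agree for 1 ≤ p < k
theorem pv_inner_eq (k p : Int) (hp1 : 1 ≤ p) (hpk : p < k) :
    ((PySem.List.pyRange 1 (k - p + 1) 1).filter
        (fun m => decide (m ≤ p ∧ k - m - p ≤ m))).map (fun m => [p, m, k - m - p])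
      = ((PySem.List.pyRange 1 (min p (k - p) + 1) 1).filter
          (fun m => decide (0 ≤ k - p - m ∧ k - p - m ≤ m))).map (fun m => [p, m, k - p - m]) := by
  rw [PySem.List.pyRange_one_append 1 (min p (k - p) + 1) (k - p + 1) (by omega) (by omega)]
  rw [List.filter_append, List.map_append]
  have h2 : (PySem.List.pyRange (min p (k - p) + 1) (k - p + 1) 1).filter
      (fun m => decide (m ≤ p ∧ k - m - p ≤ m)) = [] := by
    rw [List.filter_eq_nil_iff]
    intro m hm
    have := PySem.List.mem_pyRange_one.1 hm
    simp only [decide_eq_true_eq]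
    omega
  rw [h2, List.map_nil, List.append_nil]
  have hfc : ∀ m ∈ PySem.List.pyRange 1 (min p (k - p) + 1) 1,
      (decide (m ≤ p ∧ k - m - p ≤ m)) = (decide (0 ≤ k - p - m ∧ k - p - m ≤ m)) := by
    intro m hm
    have := PySem.List.mem_pyRange_one.1 hm
    rw [decide_eq_decide]
    constructor <;> (intro; constructor <;> omega)
  rw [List.filter_congr hfc]
  refine List.map_congr_left ?_
  intro m hm
  have h3 : k - m - p = k - p - m := by ring
  rw [h3]

theorem pv_filter_map_flatMap {β : Type} (l : List Int) (g : Int → List Int)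
    (q : Int × Int → Bool) (e : Int × Int → β) :
    ((l.flatMap (fun p => (g p).map (fun m => (p, m)))).filter q).map e
      = l.flatMap (fun p => ((g p).filter (fun m => q (p, m))).map (fun m => e (p, m))) := by
  induction l with
  | nil => rfl
  | cons p t ih =>
    simp [List.filter_append, List.map_append, List.filter_map, List.map_map, ih,
      Function.comp_def]

theorem pv_main (k : Int) : generation_stars k = generation_stars_alt k := by
  rw [pv_A_eq, pv_B_eq]
  have hrange : min (k - 1) k + 1 = k := by omega
  rw [hrange]
  unfold pvPairs
  rw [pv_filter_map_flatMap]
  refine List.flatMap_congr ?_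
  intro p hp
  have h := PySem.List.mem_pyRange_one.1 hp
  exact pv_inner_eq k p h.1 h.2

-- ===== VERDICT (by name: the statement is the Claim_ definition above) =====
theorem generation_stars_spec : Claim_equal_generation_stars := by
  intro k _
  unfold Spec_generation_stars
  exact pv_main k
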